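-- pv_equiv track=rewrite | github.com/Programmeren-voor-Wiskunde/Eindopdracht | Functions.py | possible_combinations
-- ===== SOURCE A (Python) =====
-- import copy
--
-- def possible_combinations(set_of_twelve: list):
--     """
--     This function returns all the possible combinations of three different
--     indices from a list of indices, in which the order of the indices doesn't matter.
--
--     Parameters
--     ----------
--     set_of_twelve : list
--         List of the cards in the set of twelve cards on the table.
--
--     Returns
--     -------
--     possibilities : list
--         All possible combinations of three indices in a set of indices.
--
--     """
--     #initialise possibilities
--     possibilities = []
--
--     # append combinations to possibilities
--     for i in range(len(set_of_twelve)):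
--         combination = [i]
--         for j in range(i+1,len(set_of_twelve)):
--             combination.append(j)
--             for k in range(j+1,len(set_of_twelve)):
--                 combination.append(k)
--                 if combination not in possibilities and len(combination)==3:
--                     possibilities.append(copy.copy(combination))
--                     # prepare for a new combination
--                     combination.pop()
--             # prepare for a new combination
--             combination.pop()
--     return possibilities
-- ===== SOURCE B (Python) =====
-- def possible_combinations(set_of_twelve: list):
--     """All combinations of three different indices (order-insensitive),
--     emitted directly as i<j<k triples without any membership scan."""
--     n = len(set_of_twelve)
--     return [[i, j, k] for i in range(n)
--                       for j in range(i + 1, n)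
--                       for k in range(j + 1, n)]
-- ===== Notes on version B (the rewrite author's own statement) =====
-- stated objective: simpler
-- what changed: B emits each i<j<k index triple directly with a comprehension, dropping A's mutated accumulator list and its 'not in possibilities' membership scan per triple.
import Mathlib
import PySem

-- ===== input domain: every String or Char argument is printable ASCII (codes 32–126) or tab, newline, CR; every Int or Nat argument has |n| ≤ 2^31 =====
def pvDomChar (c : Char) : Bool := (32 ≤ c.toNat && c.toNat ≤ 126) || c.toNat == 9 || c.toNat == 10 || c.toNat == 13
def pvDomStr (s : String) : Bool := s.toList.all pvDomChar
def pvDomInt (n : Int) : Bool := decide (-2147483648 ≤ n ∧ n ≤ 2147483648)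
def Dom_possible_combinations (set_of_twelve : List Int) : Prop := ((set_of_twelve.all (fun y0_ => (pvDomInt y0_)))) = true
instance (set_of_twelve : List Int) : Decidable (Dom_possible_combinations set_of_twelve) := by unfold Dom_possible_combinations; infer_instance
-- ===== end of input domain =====

-- B emits each i<j<k index triple directly (triple comprehension), dropping A's
-- mutated accumulator list and its per-triple membership scan; simpler and shorter.


-- ===== PORT A =====
-- innermost loop body: append k, then the guarded append + copy.copy/pop()
-- (list.pop() here removes the element just appended, so it is dropLast; exact since the list is nonempty)
def pvInnerStep (st : List (List Int) × List Int) (k : Int) : List (List Int) × List Int :=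
  let comb := st.2 ++ [k]
  if comb ∉ st.1 ∧ comb.length = 3 then (st.1 ++ [comb], comb.dropLast) else (st.1, comb)

-- middle loop body: append j, run the k-loop, then combination.pop()
def pvMidStep (n : Int) (st : List (List Int) × List Int) (j : Int) : List (List Int) × List Int :=
  (((PySem.List.pyRange (j + 1) n 1).foldl pvInnerStep (st.1, st.2 ++ [j])).1,
   ((PySem.List.pyRange (j + 1) n 1).foldl pvInnerStep (st.1, st.2 ++ [j])).2.dropLast)

-- outer loop body: combination = [i], run the j-loop
def pvOuterStep (n : Int) (poss : List (List Int)) (i : Int) : List (List Int) :=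
  ((PySem.List.pyRange (i + 1) n 1).foldl (pvMidStep n) (poss, [i])).1

def possible_combinations (set_of_twelve : List Int) : List (List Int) :=
  (PySem.List.pyRange 0 (PySem.List.len set_of_twelve) 1).foldl
    (pvOuterStep (PySem.List.len set_of_twelve)) []

-- ===== PORT B =====
def possible_combinations_alt (set_of_twelve : List Int) : List (List Int) :=
  let n := PySem.List.len set_of_twelve
  (PySem.List.pyRange 0 n 1).flatMap (fun i =>
    (PySem.List.pyRange (i + 1) n 1).flatMap (fun j =>
      (PySem.List.pyRange (j + 1) n 1).map (fun k => [i, j, k])))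

-- ===== PRECONDITION & SPEC =====
def Spec_possible_combinations (set_of_twelve : List Int) (out : List (List Int)) : Prop := out = possible_combinations_alt set_of_twelve
instance (set_of_twelve : List Int) (out : List (List Int)) : Decidable (Spec_possible_combinations set_of_twelve out) := by unfold Spec_possible_combinations; infer_instance

-- ===== CLAIM (what is proved, stated in full; the proofs are below) =====
def Claim_equal_possible_combinations : Prop := ∀ (set_of_twelve : List Int), Dom_possible_combinations set_of_twelve → Spec_possible_combinations set_of_twelve (possible_combinations set_of_twelve)

-- ===== LEMMAS AND PROOFS =====

-- The k-loop: since no [i,j,k] with a ≤ k is yet present, the guard always fires,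
-- so it just appends the triples in order and restores combination to [i,j].
lemma pv_inner_loop (i j n : Int) :
    ∀ (m : Nat) (a : Int) (poss : List (List Int)), (n - a).toNat ≤ m →
      (∀ k, a ≤ k → [i, j, k] ∉ poss) →
      (PySem.List.pyRange a n 1).foldl pvInnerStep (poss, [i, j]) =
        (poss ++ (PySem.List.pyRange a n 1).map (fun k => [i, j, k]), [i, j]) := by
  intro m
  induction m with
  | zero =>
    intro a poss hm H
    have h : n ≤ a := by omega
    simp [PySem.List.pyRange_one_eq_nil h]
  | succ m ih =>
    intro a poss hm H
    by_cases h : n ≤ a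
    · simp [PySem.List.pyRange_one_eq_nil h]
    · push Not at h
      rw [PySem.List.pyRange_one_cons h]
      simp only [List.foldl_cons, List.map_cons]
      have hstep : pvInnerStep (poss, [i, j]) a = (poss ++ [[i, j, a]], [i, j]) := by
        simp [pvInnerStep, H a le_rfl]
      rw [hstep, ih (a + 1) _ (by omega) ?_]
      · simp
      · intro k hk hmem
        rcases List.mem_append.1 hmem with h1 | h2
        · exact H k (by omega) h1
        · simp at h2; omega

-- The j-loop: appends, for each j in range, all [i,j,k] triples, restoring combination to [i].
lemma pv_mid_loop (i n : Int) :
    ∀ (m : Nat) (a : Int) (poss : List (List Int)), (n - a).toNat ≤ m →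
      (∀ j k, a ≤ j → [i, j, k] ∉ poss) →
      (PySem.List.pyRange a n 1).foldl (pvMidStep n) (poss, [i]) =
        (poss ++ (PySem.List.pyRange a n 1).flatMap (fun j =>
          (PySem.List.pyRange (j + 1) n 1).map (fun k => [i, j, k])), [i]) := by
  intro m
  induction m with
  | zero =>
    intro a poss hm H
    have h : n ≤ a := by omega
    simp [PySem.List.pyRange_one_eq_nil h]
  | succ m ih =>
    intro a poss hm H
    by_cases h : n ≤ a
    · simp [PySem.List.pyRange_one_eq_nil h]
    · push Not at h
      rw [PySem.List.pyRange_one_cons h]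
      simp only [List.foldl_cons, List.flatMap_cons]
      have hstep : pvMidStep n (poss, [i]) a =
          (poss ++ (PySem.List.pyRange (a + 1) n 1).map (fun k => [i, a, k]), [i]) := by
        simp only [pvMidStep, List.singleton_append]
        rw [pv_inner_loop i a n (n - (a + 1)).toNat (a + 1) poss le_rfl
          (fun k _ => H a k le_rfl)]
        simp
      rw [hstep, ih (a + 1) _ (by omega) ?_]
      · simp
      · intro j k hj hmem
        rcases List.mem_append.1 hmem with h1 | h2
        · exact H j k (by omega) h1
        · simp at h2; omega

-- The i-loop: accumulates the full triple comprehension.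
lemma pv_outer_loop (n : Int) :
    ∀ (m : Nat) (a : Int) (poss : List (List Int)), (n - a).toNat ≤ m →
      (∀ i j k, a ≤ i → [i, j, k] ∉ poss) →
      (PySem.List.pyRange a n 1).foldl (pvOuterStep n) poss =
        poss ++ (PySem.List.pyRange a n 1).flatMap (fun i =>
          (PySem.List.pyRange (i + 1) n 1).flatMap (fun j =>
            (PySem.List.pyRange (j + 1) n 1).map (fun k => [i, j, k]))) := by
  intro m
  induction m with
  | zero =>
    intro a poss hm H
    have h : n ≤ a := by omega
    simp [PySem.List.pyRange_one_eq_nil h]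
  | succ m ih =>
    intro a poss hm H
    by_cases h : n ≤ a
    · simp [PySem.List.pyRange_one_eq_nil h]
    · push Not at h
      rw [PySem.List.pyRange_one_cons h]
      simp only [List.foldl_cons, List.flatMap_cons]
      have hstep : pvOuterStep n poss a =
          poss ++ (PySem.List.pyRange (a + 1) n 1).flatMap (fun j =>
            (PySem.List.pyRange (j + 1) n 1).map (fun k => [a, j, k])) := by
        simp only [pvOuterStep]
        rw [pv_mid_loop a n (n - (a + 1)).toNat (a + 1) poss le_rfl
          (fun j k _ => H a j k le_rfl)]
      rw [hstep, ih (a + 1) _ (by omega) ?_]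
      · simp
      · intro i j k hi hmem
        rcases List.mem_append.1 hmem with h1 | h2
        · exact H i j k (by omega) h1
        · simp at h2; omega

-- ===== VERDICT (by name: the statement is the Claim_ definition above) =====
theorem possible_combinations_spec : Claim_equal_possible_combinations := by
  intro s _
  unfold Spec_possible_combinations possible_combinations possible_combinations_alt
  rw [pv_outer_loop (PySem.List.len s) (PySem.List.len s).toNat 0 [] (by omega)
    (by intro i j k _ h; simp at h)]
  simp
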